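-- pv_equiv track=rewrite | github.com/godekdls/bio-informatics | find_forward_and_reverse_strand.py | get_symbol_array
-- ===== SOURCE A (Python) =====
-- def get_symbol_array(genome, symbol):
--     array = {}
--     n = len(genome)
--     ExtendedGenome = genome + genome[0:n // 2]
--     for i in range(n):
--         window = ExtendedGenome[i:i + (n // 2)]
--         array[i] = get_pattern_count(symbol, window)
--     return array
--
-- def get_pattern_count(pattern, text):
--     count = 0
--     for i in range(len(text) - len(pattern) + 1):
--         if text[i:i + len(pattern)] == pattern:
--             count += 1
--     return count
-- ===== SOURCE B (Python) =====
-- def get_symbol_array(genome, symbol):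
--     n = len(genome)
--     half = n // 2
--     ext = genome + genome[:half]
--     m = len(symbol)
--     width = max(0, half - m + 1)
--     hi = max(0, n - 1 + width)
--     # prefix[j] = number of pattern-start positions < j in the extended genome
--     prefix = [0]
--     running = 0
--     for j in range(hi):
--         if ext.startswith(symbol, j):
--             running += 1
--         prefix.append(running)
--     return {i: prefix[i + width] - prefix[i] for i in range(n)}
-- ===== Notes on version B (the rewrite author's own statement) =====
-- stated objective: faster
-- what changed: Instead of recounting each length-n/2 window from scratch with get_pattern_count, B scans the extended genome once marking pattern-start positions (startswith, no slice copies), accumulates a prefix-sum array of those indicators, and reads every window count off as a difference of two prefix sums.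
import Mathlib
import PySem

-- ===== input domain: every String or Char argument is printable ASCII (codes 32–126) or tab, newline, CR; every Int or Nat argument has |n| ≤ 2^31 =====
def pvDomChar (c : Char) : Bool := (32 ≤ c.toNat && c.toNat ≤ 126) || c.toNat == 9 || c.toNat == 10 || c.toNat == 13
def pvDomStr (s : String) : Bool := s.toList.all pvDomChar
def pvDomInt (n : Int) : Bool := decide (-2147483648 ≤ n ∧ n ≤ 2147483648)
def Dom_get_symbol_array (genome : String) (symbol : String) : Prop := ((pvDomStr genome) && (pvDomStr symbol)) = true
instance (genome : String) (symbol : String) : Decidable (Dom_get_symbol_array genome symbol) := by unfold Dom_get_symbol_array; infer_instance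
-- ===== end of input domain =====

-- B replaces A's per-window rescans with one pattern-start indicator pass plus prefix
-- sums, so each window count is a difference of two prefix sums (objective: faster).

-- ===== PORT A =====
def get_pattern_count (pattern : List Char) (text : List Char) : Int :=
  (PySem.List.pyRange 0 ((text.length : Int) - (pattern.length : Int) + 1) 1).foldl
    (fun count i =>
      if PySem.List.slice text (some i) (some (i + (pattern.length : Int))) = pattern then count + 1
      else count) 0

def get_symbol_array (genome : String) (symbol : String) : List (Int × Int) :=
  let g := genome.toList
  let n : Int := (g.length : Int)
  let extendedGenome := g ++ PySem.List.slice g (some 0) (some (PySem.Int.floordiv n 2))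
  ((PySem.List.pyRange 0 n 1).foldl
    (fun (array : PySem.Dict Int Int) i =>
      array.insert i (get_pattern_count symbol.toList
        (PySem.List.slice extendedGenome (some i) (some (i + PySem.Int.floordiv n 2)))))
    PySem.Dict.empty).items

-- ===== PORT B =====
def get_symbol_array_alt (genome : String) (symbol : String) : List (Int × Int) :=
  let g := genome.toList
  let n : Int := (g.length : Int)
  let half := PySem.Int.floordiv n 2
  let ext := g ++ PySem.List.slice g none (some half)
  let m : Int := (symbol.toList.length : Int)
  let width := max 0 (half - m + 1)
  let hi := max 0 (n - 1 + width)
  -- 'ext.startswith(symbol, j)' is ported by hand as a slice comparison: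
  -- exact for 0 ≤ j ≤ len(ext), which pyRange guarantees here
  let prefixs := ((PySem.List.pyRange 0 hi 1).foldl
    (fun (p : List Int × Int) j =>
      let running := if PySem.List.slice ext (some j) (some (j + m)) = symbol.toList then p.2 + 1 else p.2
      (p.1 ++ [running], running)) ([0], 0)).1
  (PySem.List.pyRange 0 n 1).map
    (fun i => (i, PySem.List.pyGetD prefixs (i + width) 0 - PySem.List.pyGetD prefixs i 0))

-- ===== PRECONDITION & SPEC =====
def Spec_get_symbol_array (genome : String) (symbol : String) (out : List (Int × Int)) : Prop := out = get_symbol_array_alt genome symbol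
instance (genome : String) (symbol : String) (out : List (Int × Int)) : Decidable (Spec_get_symbol_array genome symbol out) := by unfold Spec_get_symbol_array; infer_instance

-- ===== CLAIM (what is proved, stated in full; the proofs are below) =====
def Claim_equal_get_symbol_array : Prop := ∀ (genome : String) (symbol : String), Dom_get_symbol_array genome symbol → Spec_get_symbol_array genome symbol (get_symbol_array genome symbol)

-- ===== LEMMAS AND PROOFS =====

-- the prefix loop: state after folding l from (acc, s0)
theorem prefix_foldl (l : List Int) (acc : List Int) (s0 : Int) :
    (l.foldl (fun (p : List Int × Int) v => (p.1 ++ [p.2 + v], p.2 + v)) (acc, s0)).1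
      = acc ++ (List.range l.length).map (fun k => s0 + (l.take (k+1)).sum) := by
  induction l generalizing acc s0 with
  | nil => simp
  | cons v t ih =>
    simp only [List.foldl_cons, ih]
    simp [List.range_succ_eq_map, List.map_map, Function.comp_def, List.take_succ_cons, add_assoc]

theorem prefix_getD (l : List Int) (j : Nat) (hj : j ≤ l.length) :
    PySem.List.pyGetD ((l.foldl (fun (p : List Int × Int) v => (p.1 ++ [p.2 + v], p.2 + v)) (([0] : List Int), (0:Int))).1) (j : Int) 0
      = (l.take j).sum := by
  rw [prefix_foldl, PySem.List.pyGetD_natCast]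
  cases j with
  | zero => simp
  | succ jj =>
    have hjj : jj < l.length := by omega
    simp [List.getD_eq_getElem?_getD, List.getElem?_map, List.getElem?_range hjj]

-- a window slice of a slice is a slice of the underlying list
theorem slice_slice (e : List Char) (a h k m : Nat) (hkm : m = 0 ∨ k + m ≤ h) :
    PySem.List.slice ((e.drop a).take h) (some (k:Int)) (some ((k:Int)+(m:Int)))
      = PySem.List.slice e (some ((a:Int)+(k:Int))) (some ((a:Int)+(k:Int)+(m:Int))) := by
  rw [show ((a:Int)+(k:Int)) = ((a+k : Nat) : Int) by push_cast; ring]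
  rw [PySem.List.slice_natCast_add, PySem.List.slice_natCast_add]
  rw [List.drop_take, List.take_take, List.drop_drop]
  have h1 : min m (h - k) = m := by omega
  rw [h1]

-- pattern-start indicator of position j
def pvIndF (e pat : List Char) (j : Int) : Int :=
  if PySem.List.slice e (some j) (some (j + (pat.length:Int))) = pat then 1 else 0

-- the first N indicator values
def pvInd (e pat : List Char) (N : Nat) : List Int :=
  (PySem.List.pyRange 0 (N : Int) 1).map (pvIndF e pat)

theorem ind_take (e pat : List Char) (N j : Nat) (hj : j ≤ N) :
    (pvInd e pat N).take j = (List.range j).map (fun k => pvIndF e pat (k : Nat)) := by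
  simp [pvInd, PySem.List.pyRange_one, List.map_map, ← List.map_take, List.take_range,
    Function.comp_def, Nat.min_eq_left hj]

-- A's window count is the sum of the indicators of the window's start positions
theorem countA (e pat : List Char) (a h : Nat) (hah : a + h ≤ e.length) :
    get_pattern_count pat (PySem.List.slice e (some (a:Int)) (some ((a:Int)+(h:Int))))
      = ((List.range (((h:Int) - (pat.length:Int) + 1).toNat)).map (fun k => pvIndF e pat ((a+k : Nat):Int))).sum := by
  unfold get_pattern_count
  rw [PySem.List.slice_natCast_add]
  have hlen : ((e.drop a).take h).length = h := by simp; omega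
  rw [hlen, PySem.List.foldl_ite_add_one, PySem.List.pyRange_one]
  simp only [List.countP_map, zero_add, sub_zero]
  have hR : ((List.range (((h:Int)-(pat.length:Int)+1).toNat)).map (fun k => pvIndF e pat ((a+k : Nat):Int))).sum
      = ((List.range (((h:Int)-(pat.length:Int)+1).toNat)).countP
          (fun k => decide (PySem.List.slice e (some ((a+k:Nat):Int)) (some (((a+k:Nat):Int)+(pat.length:Int))) = pat)) : Int) := by
    rw [← PySem.List.sum_map_ite_one_zero]
    simp [pvIndF]
  rw [hR]
  norm_cast
  apply List.countP_congr
  intro k hk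
  simp only [List.mem_range] at hk
  have hk' : pat.length = 0 ∨ k + pat.length ≤ h := by
    rw [Int.subNatNat_eq_coe] at hk; omega
  have hsl := slice_slice e a h k pat.length hk'
  simp [hsl]

-- B's prefix-sum difference is the same sum of indicators
theorem B_val (e pat : List Char) (a W N : Nat) (haW : a + W ≤ N) :
    PySem.List.pyGetD (((pvInd e pat N).foldl (fun (p : List Int × Int) v => (p.1 ++ [p.2 + v], p.2 + v)) (([0]:List Int), (0:Int))).1) ((a+W : Nat):Int) 0
      - PySem.List.pyGetD (((pvInd e pat N).foldl (fun (p : List Int × Int) v => (p.1 ++ [p.2 + v], p.2 + v)) (([0]:List Int), (0:Int))).1) ((a:Nat):Int) 0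
      = ((List.range W).map (fun k => pvIndF e pat ((a+k : Nat):Int))).sum := by
  have hlen : (pvInd e pat N).length = N := by
    simp [pvInd, PySem.List.length_pyRange_one]
  rw [prefix_getD _ _ (by omega), prefix_getD _ _ (by omega)]
  rw [ind_take _ _ _ _ (by omega), ind_take _ _ _ _ (by omega)]
  rw [List.range_add]
  simp [List.sum_append, List.map_map, Function.comp_def]

def pvExt (g : List Char) : List Char := g ++ g.take (g.length / 2)

def pvW (g pat : List Char) : Nat := (((g.length / 2 : Nat):Int) - (pat.length:Int) + 1).toNat

def pvHi (g pat : List Char) : Nat := (max 0 ((g.length:Int) - 1 + ((pvW g pat : Nat):Int))).toNat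

def pvPrefix (g pat : List Char) : List Int :=
  ((pvInd (pvExt g) pat (pvHi g pat)).foldl (fun (p : List Int × Int) v => (p.1 ++ [p.2 + v], p.2 + v)) (([0]:List Int), (0:Int))).1

theorem len_pvExt (g : List Char) : (pvExt g).length = g.length + g.length / 2 := by
  simp [pvExt]; omega

theorem cnt_agree (g pat : List Char) (a : Nat) (ha : a < g.length) :
    get_pattern_count pat (PySem.List.slice (pvExt g) (some (a:Int)) (some ((a:Int) + ((g.length/2 : Nat):Int))))
      = PySem.List.pyGetD (pvPrefix g pat) ((a:Int) + ((pvW g pat : Nat):Int)) 0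
        - PySem.List.pyGetD (pvPrefix g pat) (a:Int) 0 := by
  have hE := len_pvExt g
  have hHi : pvHi g pat = g.length - 1 + pvW g pat := by unfold pvHi; omega
  have hW : (a:Int) + ((pvW g pat : Nat):Int) = ((a + pvW g pat : Nat) : Int) := by push_cast; ring
  rw [hW]
  rw [countA (pvExt g) pat a (g.length/2) (by omega)]
  rw [show ((a:Int)) = ((a:Nat):Int) from rfl]
  rw [pvPrefix.eq_def]
  rw [B_val (pvExt g) pat a (pvW g pat) (pvHi g pat) (by omega)]
  rfl

theorem get_symbol_array_eq_alt (genome symbol : String) :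
    get_symbol_array genome symbol = get_symbol_array_alt genome symbol := by
  unfold get_symbol_array get_symbol_array_alt
  dsimp only
  have hfd : PySem.Int.floordiv ((genome.toList.length : Int)) 2 = ((genome.toList.length / 2 : Nat) : Int) := by
    exact_mod_cast PySem.Int.floordiv_natCast genome.toList.length 2
  rw [hfd]
  have hsl0 : PySem.List.slice genome.toList (some 0) (some ((genome.toList.length / 2 : Nat):Int))
      = genome.toList.take (genome.toList.length / 2) := by
    rw [PySem.List.slice_zero_start]; exact PySem.List.slice_to_natCast _ _
  have hsl1 : PySem.List.slice genome.toList none (some ((genome.toList.length / 2 : Nat):Int))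
      = genome.toList.take (genome.toList.length / 2) :=
    PySem.List.slice_to_natCast _ _
  rw [hsl0, hsl1]
  rw [show genome.toList ++ genome.toList.take (genome.toList.length / 2) = pvExt genome.toList from rfl]
  rw [PySem.Dict.items_foldl_insert_fresh _ (fun i => i)
        (fun i => get_pattern_count symbol.toList
          (PySem.List.slice (pvExt genome.toList) (some i) (some (i + ((genome.toList.length / 2 : Nat):Int)))))
        PySem.Dict.empty (by intro a _; simp) (by simpa using PySem.List.nodup_pyRange_one 0 (genome.toList.length : Int))]
  -- name the Int-level width/hi and replace them by casts of pvW/pvHi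
  have hWc : max 0 (((genome.toList.length / 2 : Nat):Int) - ((symbol.toList.length : Nat):Int) + 1)
      = ((pvW genome.toList symbol.toList : Nat) : Int) := by
    unfold pvW; rw [max_comm, ← Int.ofNat_toNat]
  have hHic : max 0 ((genome.toList.length : Int) - 1 + ((pvW genome.toList symbol.toList : Nat):Int))
      = ((pvHi genome.toList symbol.toList : Nat) : Int) := by
    unfold pvHi; rw [max_comm, ← Int.ofNat_toNat]; omega
  rw [hWc, hHic]
  -- the running-counter fold is the prefix fold over the indicator list
  have hfun : (fun (p : List Int × Int) (j : Int) =>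
        let running := if PySem.List.slice (pvExt genome.toList) (some j) (some (j + ((symbol.toList.length : Nat):Int))) = symbol.toList then p.2 + 1 else p.2
        (p.1 ++ [running], running))
      = (fun (p : List Int × Int) (j : Int) => (p.1 ++ [p.2 + pvIndF (pvExt genome.toList) symbol.toList j], p.2 + pvIndF (pvExt genome.toList) symbol.toList j)) := by
    funext p j
    simp only [pvIndF]
    split <;> simp
  rw [hfun]
  rw [show (PySem.List.pyRange 0 ((pvHi genome.toList symbol.toList : Nat):Int) 1).foldl
        (fun (p : List Int × Int) (j : Int) => (p.1 ++ [p.2 + pvIndF (pvExt genome.toList) symbol.toList j], p.2 + pvIndF (pvExt genome.toList) symbol.toList j)) (([0]:List Int), (0:Int))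
      = (pvInd (pvExt genome.toList) symbol.toList (pvHi genome.toList symbol.toList)).foldl
        (fun (p : List Int × Int) v => (p.1 ++ [p.2 + v], p.2 + v)) (([0]:List Int), (0:Int)) from by
    rw [pvInd.eq_def, List.foldl_map]]
  simp only [show (PySem.Dict.empty : PySem.Dict Int Int).items = [] from rfl, List.nil_append]
  apply List.map_congr_left
  intro i hi
  rw [PySem.List.mem_pyRange_one] at hi
  obtain ⟨a, rfl⟩ := Int.eq_ofNat_of_zero_le hi.1
  have ha : a < genome.toList.length := by exact_mod_cast hi.2
  refine Prod.ext rfl ?_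
  simpa [pvPrefix] using cnt_agree genome.toList symbol.toList a ha

-- ===== VERDICT (by name: the statement is the Claim_ definition above) =====
theorem get_symbol_array_spec : Claim_equal_get_symbol_array := by
  intro genome symbol _
  exact get_symbol_array_eq_alt genome symbol
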